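-- pv_equiv track=rewrite | github.com/PKU-GeekGame/geekgame-2nd | official_writeup/cube64/src/disassembler.py | decode_byte
-- ===== SOURCE A (Python) =====
-- INSTS = [
--     # name, mask,     opcode
--     ('nop', 0b1111111, 0b0000000),
--     ('dup', 0b1111111, 0b0000001),
--     ('swap', 0b1111111, 0b0000010),
--     ('ld', 0b1111111, 0b0000011),
--     ('st', 0b1111111, 0b0000100),
--     ('out', 0b1111111, 0b0000101),
--     ('halt', 0b1111111, 0b0000110),
--     ('inc', 0b1111111, 0b0000111),
--     ('add', 0b1111111, 0b0001000),
--     ('sub', 0b1111111, 0b0001001),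
--     ('and', 0b1111111, 0b0001010),
--     ('or', 0b1111111, 0b0001011),
--     ('not', 0b1111111, 0b0001100),
--     ('xor', 0b1111111, 0b0001101),
--     ('shl', 0b1111111, 0b0001110),
--     ('shr', 0b1111111, 0b0001111),
--     ('sar', 0b1111111, 0b0010000),
--     ('lt', 0b1111111, 0b0010001),
--     ('ltu', 0b1111111, 0b0010010),
--     ('eq', 0b1111111, 0b0010011),
--     ('bt', 0b1111000, 0b0100000),
--     ('bf', 0b1111000, 0b0101000),
--     ('j', 0b1111000, 0b0110000),
--     ('li', 0b1000000, 0b1000000),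
-- ]
--
-- def decode_dir(b: int) -> str:
--   return ['xp', 'xn', 'yp', 'yn', 'zp', 'zn'][b & 0b111]
--
-- def decode_imm(b: int) -> str:
--   imm = b & 0b0111111
--   if imm & 0b100000:
--     imm = -((~imm + 1) & 0b111111)
--   return str(imm)
--
-- def decode_byte(b: int) -> str:
--   for name, mask, opcode in INSTS:
--     if b & mask == opcode:
--       if name in ['bt', 'bf', 'j']:
--         return f'{name} {decode_dir(b)}'
--       elif name == 'li':
--         return f'{name} {decode_imm(b)}'
--       else:
--         return name
--   raise RuntimeError('unknown byte')
-- ===== SOURCE B (Python) =====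
-- # Direct bit-field dispatch on the low 7 bits instead of scanning the INSTS mask table.
-- SIMPLE = ['nop', 'dup', 'swap', 'ld', 'st', 'out', 'halt', 'inc',
--           'add', 'sub', 'and', 'or', 'not', 'xor', 'shl', 'shr',
--           'sar', 'lt', 'ltu', 'eq']
-- DIRS = ['xp', 'xn', 'yp', 'yn', 'zp', 'zn']
-- BRANCH = {0b0100000: 'bt', 0b0101000: 'bf', 0b0110000: 'j'}
--
-- def decode_byte(b: int) -> str:
--   op = b & 0b1111111
--   if op & 0b1000000:
--     imm = op & 0b0111111
--     if imm >= 32: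
--       imm -= 64
--     return f'li {imm}'
--   name = BRANCH.get(op & 0b1111000)
--   if name is not None:
--     return f'{name} {DIRS[op & 0b111]}'
--   if op < len(SIMPLE):
--     return SIMPLE[op]
--   raise RuntimeError('unknown byte')
-- ===== Notes on version B (the rewrite author's own statement) =====
-- stated objective: simpler
-- what changed: Replaces A's linear scan of the 24-entry (name, mask, opcode) table and its bit-trick two's-complement immediate decoding by direct dispatch on the bit fields of the low 7 bits (li bit, branch field via a 3-entry map, simple opcodes indexed into a name list) with plain arithmetic sign extension.
-- outside the precondition, e.g. on decode_byte(20): A raises RuntimeError, B raises RuntimeError; on decode_byte(38): A raises IndexError, B raises IndexError; on decode_byte(56): A raises RuntimeError, B raises RuntimeError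
import Mathlib
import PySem

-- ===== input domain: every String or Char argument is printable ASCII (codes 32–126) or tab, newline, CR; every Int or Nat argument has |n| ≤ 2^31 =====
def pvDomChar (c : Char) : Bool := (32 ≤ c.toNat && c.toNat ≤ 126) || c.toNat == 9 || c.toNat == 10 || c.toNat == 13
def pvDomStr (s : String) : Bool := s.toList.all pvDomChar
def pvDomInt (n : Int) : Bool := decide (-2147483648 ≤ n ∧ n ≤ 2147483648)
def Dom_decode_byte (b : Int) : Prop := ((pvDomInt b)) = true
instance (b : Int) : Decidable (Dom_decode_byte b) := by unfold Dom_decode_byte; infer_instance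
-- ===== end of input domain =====

-- B replaces A's scan of the masked-opcode table by direct dispatch on the bit fields of the
-- low 7 bits (objective: simpler).  Equivalence is over the return value on the bytes where A
-- returns (Pre_ below); where A raises, B raises the same exceptions.

-- ===== PORT A =====
def pvInsts : List (String × Int × Int) :=
  [("nop", 127, 0), ("dup", 127, 1), ("swap", 127, 2), ("ld", 127, 3),
   ("st", 127, 4), ("out", 127, 5), ("halt", 127, 6), ("inc", 127, 7),
   ("add", 127, 8), ("sub", 127, 9), ("and", 127, 10), ("or", 127, 11),
   ("not", 127, 12), ("xor", 127, 13), ("shl", 127, 14), ("shr", 127, 15),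
   ("sar", 127, 16), ("lt", 127, 17), ("ltu", 127, 18), ("eq", 127, 19),
   ("bt", 120, 32), ("bf", 120, 40), ("j", 120, 48), ("li", 64, 64)]

-- ['xp',…][b & 0b111]; Python raises IndexError when b & 7 ≥ 6 (pyGet? = none), excluded by Pre_
def pvDecodeDir (b : Int) : String :=
  (PySem.List.pyGet? ["xp", "xn", "yp", "yn", "zp", "zn"] (PySem.Int.band b 7)).getD ""

def pvDecodeImm (b : Int) : String :=
  let imm := PySem.Int.band b 63
  let imm := if PySem.Int.band imm 32 ≠ 0 then -(PySem.Int.band (Int.not imm + 1) 63) else imm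
  PySem.Int.toStr imm

-- the 'for … in INSTS' loop; the fall-through 'raise RuntimeError' (excluded by Pre_) yields ""
def pvScan (b : Int) : List (String × Int × Int) → String
  | [] => ""
  | (name, mask, opcode) :: rest =>
    if PySem.Int.band b mask = opcode then
      if ["bt", "bf", "j"].contains name then name ++ " " ++ pvDecodeDir b
      else if name = "li" then name ++ " " ++ pvDecodeImm b
      else name
    else pvScan b rest

def decode_byte (b : Int) : String := pvScan b pvInsts

-- ===== PORT B =====
def pvSimple : List String :=
  ["nop", "dup", "swap", "ld", "st", "out", "halt", "inc", "add", "sub",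
   "and", "or", "not", "xor", "shl", "shr", "sar", "lt", "ltu", "eq"]

def pvDirs : List String := ["xp", "xn", "yp", "yn", "zp", "zn"]

def pvBranch : PySem.Dict Int String := PySem.Dict.ofList [(32, "bt"), (40, "bf"), (48, "j")]

def decode_byte_alt (b : Int) : String :=
  let op := PySem.Int.band b 127
  if PySem.Int.band op 64 ≠ 0 then
    let imm := PySem.Int.band op 63
    let imm := if imm ≥ 32 then imm - 64 else imm
    "li " ++ PySem.Int.toStr imm
  else
    match PySem.Dict.get? pvBranch (PySem.Int.band op 120) with
    | some name => name ++ " " ++ (PySem.List.pyGet? pvDirs (PySem.Int.band op 7)).getD ""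
    | none =>
      if op < (pvSimple.length : Int) then (PySem.List.pyGet? pvSimple op).getD ""
      else ""  -- raise RuntimeError, excluded by Pre_

-- ===== PRECONDITION & SPEC =====
-- Pre_ excludes exactly the bytes on which the Python A raises: low-7 values 20–31 and 56–63
-- (RuntimeError: no table entry matches) and branch bytes (low-7 in 32–55) whose direction
-- field b & 7 is 6 or 7 (IndexError in decode_dir).  B raises equally there.
def Pre_decode_byte (b : Int) : Prop :=
  ¬ (20 ≤ b.emod 128 ∧ b.emod 128 ≤ 31) ∧
  ¬ (56 ≤ b.emod 128 ∧ b.emod 128 ≤ 63) ∧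
  ¬ (32 ≤ b.emod 128 ∧ b.emod 128 ≤ 55 ∧ 6 ≤ b.emod 8)
instance (b : Int) : Decidable (Pre_decode_byte b) := by unfold Pre_decode_byte; infer_instance

def pvWitness_decode_byte : Int := (33)

def Spec_decode_byte (b : Int) (out : String) : Prop := out = decode_byte_alt b
instance (b : Int) (out : String) : Decidable (Spec_decode_byte b out) := by unfold Spec_decode_byte; infer_instance

-- ===== CLAIM (what is proved, stated in full; the proofs are below) =====
def Claim_equal_decode_byte : Prop := ∀ (b : Int), Dom_decode_byte b → Pre_decode_byte b → Spec_decode_byte b (decode_byte b)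

-- ===== LEMMAS AND PROOFS =====

-- low 7 bits only: x &&& m for m < 128 sees only x % 128
theorem pv_nat_and_low (n m : Nat) (hm : m < 128) : (n % 128) &&& m = n &&& m := by
  have h127 : ∀ x : Nat, x &&& 127 = x % 128 := fun x => by
    have := Nat.and_two_pow_sub_one_eq_mod x 7; simpa using this
  have hm' : 127 &&& m = m := by rw [Nat.and_comm, h127]; omega
  calc (n % 128) &&& m = (n &&& 127) &&& m := by rw [h127]
    _ = n &&& (127 &&& m) := Nat.and_assoc ..
    _ = n &&& m := by rw [hm']

set_option maxRecDepth 4096 in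
set_option maxHeartbeats 1000000 in
theorem pv_fin_sub : ∀ r m : Fin 128, m.val - ((127 - r.val) &&& m.val) = r.val &&& m.val := by decide

-- Python's b & m (m < 128) depends only on b mod 128
theorem pv_band_reduce (b : Int) (m : Nat) (hm : m < 128) :
    PySem.Int.band b m = PySem.Int.band (b.emod 128) m := by
  have hmod : b.emod 128 = b % 128 := rfl
  have hr0 : 0 ≤ b.emod 128 := by rw [hmod]; omega
  have hm0 : (0:Int) ≤ (m:Int) := by positivity
  have h2 : ((m:Int)).toNat = m := by omega
  by_cases hb : 0 ≤ b
  · rw [PySem.Int.band_of_nonneg hb hm0, PySem.Int.band_of_nonneg hr0 hm0]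
    have h1 : (b.emod 128).toNat = b.toNat % 128 := by rw [hmod]; omega
    rw [h1, h2, pv_nat_and_low _ _ hm]
  · have lhs : PySem.Int.band b m = ((m - (m &&& (-b - 1).toNat) : Nat) : Int) := by
      unfold PySem.Int.band
      rw [if_neg (by omega), if_pos hm0, h2]
    rw [lhs, PySem.Int.band_of_nonneg hr0 hm0, h2]
    have hkr : (-b - 1).toNat % 128 = 127 - (b.emod 128).toNat := by rw [hmod]; omega
    have h3 : m &&& (-b - 1).toNat = (127 - (b.emod 128).toNat) &&& m := by
      rw [Nat.and_comm, ← pv_nat_and_low ((-b - 1).toNat) m hm, hkr]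
    have hrlt : (b.emod 128).toNat < 128 := by rw [hmod]; omega
    have hfs := pv_fin_sub ⟨(b.emod 128).toNat, hrlt⟩ ⟨m, hm⟩
    rw [h3, hfs]

theorem pv_band_congr (x y : Int) (h : x.emod 128 = y.emod 128) (m : Int) (h0 : 0 ≤ m)
    (hm : m < 128) : PySem.Int.band x m = PySem.Int.band y m := by
  have hc : ((m.toNat : Nat) : Int) = m := by omega
  have := pv_band_reduce x m.toNat (by omega)
  have h2 := pv_band_reduce y m.toNat (by omega)
  rw [hc] at this h2
  rw [this, h2, h]

theorem pvScan_congr (x y : Int) (h : x.emod 128 = y.emod 128) :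
    ∀ l : List (String × Int × Int), (∀ p ∈ l, 0 ≤ p.2.1 ∧ p.2.1 < 128) →
    pvScan x l = pvScan y l
  | [], _ => rfl
  | (name, mask, opcode) :: rest, hl => by
    obtain ⟨h0, hm⟩ := hl _ (List.mem_cons_self ..)
    have hb : PySem.Int.band x mask = PySem.Int.band y mask :=
      pv_band_congr x y h mask h0 hm
    have hd : pvDecodeDir x = pvDecodeDir y := by
      unfold pvDecodeDir; rw [pv_band_congr x y h 7 (by norm_num) (by norm_num)]
    have hi : pvDecodeImm x = pvDecodeImm y := by
      unfold pvDecodeImm; rw [pv_band_congr x y h 63 (by norm_num) (by norm_num)]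
    simp only [pvScan, hb, hd, hi,
      pvScan_congr x y h rest (fun p hp => hl p (List.mem_cons_of_mem _ hp))]

theorem pv_A_congr (x y : Int) (h : x.emod 128 = y.emod 128) : decode_byte x = decode_byte y := by
  unfold decode_byte
  refine pvScan_congr x y h pvInsts ?_
  intro p hp
  unfold pvInsts at hp
  fin_cases hp <;> exact ⟨by norm_num, by norm_num⟩

theorem pv_B_congr (x y : Int) (h : x.emod 128 = y.emod 128) :
    decode_byte_alt x = decode_byte_alt y := by
  unfold decode_byte_alt
  rw [pv_band_congr x y h 127 (by norm_num) (by norm_num)]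

theorem pv_Pre_congr (x y : Int) (h : x.emod 128 = y.emod 128) :
    Pre_decode_byte x ↔ Pre_decode_byte y := by
  have hmx : x.emod 8 = y.emod 8 := by
    have hx : x.emod 8 = (x.emod 128).emod 8 := by
      have h1 : x.emod 128 = x % 128 := rfl
      have h2 : x.emod 8 = x % 8 := rfl
      have h3 : (x % 128).emod 8 = (x % 128) % 8 := rfl
      rw [h1, h2, h3]; omega
    have hy : y.emod 8 = (y.emod 128).emod 8 := by
      have h1 : y.emod 128 = y % 128 := rfl
      have h2 : y.emod 8 = y % 8 := rfl
      have h3 : (y % 128).emod 8 = (y % 128) % 8 := rfl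
      rw [h1, h2, h3]; omega
    rw [hx, hy, h]
  unfold Pre_decode_byte
  rw [h, hmx]

set_option maxRecDepth 8192 in
set_option maxHeartbeats 4000000 in
theorem pv_small : ∀ r : Fin 128,
    Pre_decode_byte (r.val : Int) → decode_byte (r.val : Int) = decode_byte_alt (r.val : Int) := by
  decide

-- ===== VERDICT (by name: the statement is the Claim_ definition above) =====
theorem decode_byte_spec : Claim_equal_decode_byte := by
  unfold Claim_equal_decode_byte
  intro b _ hPre
  unfold Spec_decode_byte
  have hmod : b.emod 128 = b % 128 := rfl
  have hr0 : 0 ≤ b.emod 128 := by rw [hmod]; omega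
  have hrlt : (b.emod 128).toNat < 128 := by rw [hmod]; omega
  have hval : (((b.emod 128).toNat : Nat) : Int) = b.emod 128 := by omega
  have hEm : ∀ a : Int, a.emod 128 = a % 128 := fun _ => rfl
  have hcong : b.emod 128 = (((b.emod 128).toNat : Nat) : Int).emod 128 := by
    rw [hval]; simp only [hEm]; omega
  rw [pv_A_congr b _ hcong, pv_B_congr b _ hcong]
  exact pv_small ⟨(b.emod 128).toNat, hrlt⟩ ((pv_Pre_congr b _ hcong).mp hPre)
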